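-- pv_equiv track=rewrite | github.com/ArenS2/LeetC0D3 | code/ID762.py | check
-- ===== SOURCE A (Python) =====
-- def check(n):
--     s = bin(n)[2:]
--     x = 0
--     for i in range(len(s)):
--         x += int(s[i])
--     if(x < 2):
--         return False
--     if(x == 2 or x == 3):
--         return True
--     for i in range(2, x):
--         if(x%i == 0):
--             return False
--     return True
-- ===== SOURCE B (Python) =====
-- def check(n):
--     # LeetCode 762: n fits in 32 bits, so the popcount is at most 32;
--     # test membership in the primes up to 32 instead of trial division.
--     return n.bit_count() in (2, 3, 5, 7, 11, 13, 17, 19, 23, 29, 31)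
-- ===== Notes on version B (the rewrite author's own statement) =====
-- stated objective: idiomatic
-- what changed: Replaced the binary-string digit-sum loop and trial division by int.bit_count() plus membership in the fixed set of primes up to 32 (valid since |n| <= 2^31 on the claimed domain).
import Mathlib
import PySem

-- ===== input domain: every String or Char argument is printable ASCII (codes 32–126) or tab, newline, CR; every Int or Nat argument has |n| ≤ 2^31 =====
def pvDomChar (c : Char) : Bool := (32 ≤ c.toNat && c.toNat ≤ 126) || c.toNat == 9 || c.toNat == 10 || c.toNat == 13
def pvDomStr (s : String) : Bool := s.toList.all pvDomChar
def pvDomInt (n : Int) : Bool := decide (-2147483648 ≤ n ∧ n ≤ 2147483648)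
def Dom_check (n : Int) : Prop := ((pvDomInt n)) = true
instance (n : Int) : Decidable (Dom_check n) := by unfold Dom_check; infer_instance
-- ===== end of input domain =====

-- B replaces A's binary-string digit-sum loop and trial division by bit_count()
-- plus membership in the primes up to 32 (sound on the claimed |n| ≤ 2^31 domain); A = B proved for n ≥ 0 (A raises ValueError on n < 0).

-- ===== PORT A =====
-- binary digits of m, most significant first (helper modelling Python's bin)
def pvBinChars (m : Nat) : List Char :=
  if m = 0 then [] else pvBinChars (m / 2) ++ [if m % 2 = 1 then '1' else '0']
  decreasing_by exact Nat.div_lt_self (by omega) (by omega)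

-- Python's bin(n): "0b…" / "-0b…", bin(0) = "0b0"
def pvBin (n : Int) : String :=
  String.ofList ((if n < 0 then ['-'] else []) ++ '0' :: 'b' ::
    (if n = 0 then ['0'] else pvBinChars n.natAbs))

def check (n : Int) : Bool :=
  let s := PySem.Str.slice (pvBin n) (some 2) none          -- s = bin(n)[2:]
  -- for i in range(len(s)): x += int(s[i])
  -- (.getD 0: the none cases are IndexError/ValueError; ValueError is reachable
  --  only for n < 0, which Pre_check excludes)
  let x := (PySem.List.pyRange 0 (PySem.Str.len s) 1).foldl
    (fun x i => x + ((PySem.Str.pyGet? s i).bind (fun c => PySem.Int.ofChars? [c])).getD 0) 0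
  if x < 2 then false
  else if x == 2 || x == 3 then true
  else if (PySem.List.pyRange 2 x 1).any (fun i => PySem.Int.mod x i == 0) then false
  else true

-- ===== PORT B =====
def check_alt (n : Int) : Bool :=
  [2, 3, 5, 7, 11, 13, 17, 19, 23, 29, 31].contains ((PySem.Int.bitCount n : Int))

-- ===== PRECONDITION & SPEC =====
-- Pre_ excludes exactly n < 0, where A raises ValueError (int('b') on bin(n)[2:]).
def Pre_check (n : Int) : Prop := 0 ≤ n
instance (n : Int) : Decidable (Pre_check n) := by unfold Pre_check; infer_instance
def pvWitness_check : Int := (5)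

def Spec_check (n : Int) (out : Bool) : Prop := out = check_alt n
instance (n : Int) (out : Bool) : Decidable (Spec_check n out) := by unfold Spec_check; infer_instance

-- ===== CLAIM (what is proved, stated in full; the proofs are below) =====
def Claim_equal_check : Prop := ∀ (n : Int), Dom_check n → Pre_check n → Spec_check n (check n)

-- ===== LEMMAS AND PROOFS =====

-- digit value of a char, as the A-side loop computes it
def pvDig (c : Char) : Int := (PySem.Int.ofChars? [c]).getD 0

theorem pvDig_sum_binChars (m : Nat) (x0 : Int) :
    (pvBinChars m).foldl (fun x c => x + pvDig c) x0 = x0 + (PySem.Int.bitCount (m : Int) : Int) := by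
  induction m using Nat.strong_induction_on generalizing x0 with
  | _ m ih =>
    rw [pvBinChars]
    by_cases hm : m = 0
    · simp [hm]
    · simp only [hm, ite_false, List.foldl_append, List.foldl_cons, List.foldl_nil]
      rw [ih (m / 2) (Nat.div_lt_self (by omega) (by omega)) x0]
      rw [PySem.Int.bitCount_natCast (by omega : 0 < m)]
      have d0 : pvDig '0' = 0 := by decide
      have d1 : pvDig '1' = 1 := by decide
      rcases Nat.mod_two_eq_zero_or_one m with h | h
      · simp [h, d0, d1]
      · simp [h, d0, d1]
        omega

-- A's branch structure after the digit loop, as a function of the digit sum x (proof helper)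
def pvATail (x : Int) : Bool :=
  if x < 2 then false
  else if x == 2 || x == 3 then true
  else if (PySem.List.pyRange 2 x 1).any (fun i => PySem.Int.mod x i == 0) then false
  else true

theorem pvCheck_eq_tail (n : Int) (hn : 0 ≤ n) :
    check n = pvATail ((PySem.Int.bitCount n : Nat) : Int) := by
  unfold check pvATail
  set s := PySem.Str.slice (pvBin n) (some 2) none with hsdef
  have hs : s.toList = (if n = 0 then ['0'] else pvBinChars n.natAbs) := by
    rw [hsdef]
    simp [pvBin, PySem.Str.slice, pysem, not_lt.mpr hn, List.drop]
  have hfold : (PySem.List.pyRange 0 (PySem.Str.len s) 1).foldl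
      (fun x i => x + ((PySem.Str.pyGet? s i).bind (fun c => PySem.Int.ofChars? [c])).getD 0) 0
      = s.toList.foldl (fun x c => x + pvDig c) 0 := by
    rw [PySem.Str.len_eq]
    calc (PySem.List.pyRange 0 (s.toList.length : Int) 1).foldl
          (fun x i => x + ((PySem.Str.pyGet? s i).bind (fun c => PySem.Int.ofChars? [c])).getD 0) 0
        = (PySem.List.pyRange 0 (s.toList.length : Int) 1).foldl
          (fun x i => (fun x c => x + pvDig c) x (PySem.List.pyGetD s.toList i 'a')) 0 := by
          apply PySem.List.foldl_congr_mem
          intro acc i hi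
          rw [PySem.List.mem_pyRange_one] at hi
          obtain ⟨h0, h1⟩ := hi
          have hi' : i.toNat < s.toList.length := by omega
          have hg : PySem.Str.pyGet? s i = some (s.toList[i.toNat]) := by
            show PySem.List.pyGet? s.toList i = _
            have hnc := PySem.List.pyGet?_natCast s.toList i.toNat
            rw [Int.toNat_of_nonneg h0] at hnc
            rw [hnc, List.getElem?_eq_getElem hi']
          rw [hg, PySem.List.pyGetD_eq_getElem _ 'a' h0 (by exact_mod_cast h1)]
          simp [pvDig]
      _ = s.toList.foldl (fun x c => x + pvDig c) 0 :=
          PySem.List.foldl_pyRange_zero_pyGetD' s.toList 'a' (fun x c => x + pvDig c) 0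
  have hx : s.toList.foldl (fun x c => x + pvDig c) 0 = ((PySem.Int.bitCount n : Nat) : Int) := by
    rw [hs]
    by_cases h0 : n = 0
    · simp [h0]
      decide
    · rw [if_neg h0, pvDig_sum_binChars]
      have : ((n.natAbs : Nat) : Int) = n := Int.natAbs_of_nonneg hn
      rw [this]
      omega
  simp only [hfold, hx]

theorem pvTail_eq_contains (k : Nat) (hk : k ≤ 32) :
    pvATail (k : Int) = [2, 3, 5, 7, 11, 13, 17, 19, 23, 29, 31].contains ((k : Nat) : Int) := by
  interval_cases k <;> decide

theorem pvBitCount_le (n : Int) (hdom : Dom_check n) : PySem.Int.bitCount n ≤ 32 := by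
  have hbl : PySem.Int.bitLength n ≤ 32 := by
    by_cases h0 : n = 0
    · simp [h0]
    · by_contra hgt
      rw [Nat.not_le] at hgt
      have h1 := PySem.Int.two_pow_bitLength_le n h0
      have h2 : (4294967296 : Nat) ≤ 2 ^ (PySem.Int.bitLength n - 1) := by
        calc (4294967296 : Nat) = 2 ^ 32 := by norm_num
          _ ≤ 2 ^ (PySem.Int.bitLength n - 1) := Nat.pow_le_pow_right (by omega) (by omega)
      unfold Dom_check pvDomInt at hdom
      simp only [decide_eq_true_eq] at hdom
      omega
  exact le_trans (PySem.Int.bitCount_le_bitLength n) hbl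

-- ===== VERDICT (by name: the statement is the Claim_ definition above) =====
theorem check_spec : Claim_equal_check := by
  intro n hdom hpre
  unfold Spec_check
  rw [pvCheck_eq_tail n hpre, pvTail_eq_contains (PySem.Int.bitCount n) (pvBitCount_le n hdom)]
  rfl
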